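-- pv_equiv track=rewrite | github.com/kabomekgwe/gospel-keys | backend/app/theory/voice_leading_optimization.py | apply_local_search
-- ===== SOURCE A (Python) =====
-- from typing import List, Tuple, Dict, Optional, Set, Callable
--
-- def _default_voice_movement_cost(voicing1: List[int], voicing2: List[int]) -> float:
--     """Default cost function: total voice movement."""
--     total_movement = 0
--
--     for note1 in voicing1:
--         # Find closest note in voicing2
--         min_dist = min(abs(note2 - note1) for note2 in voicing2)
--         total_movement += min_dist
--
--     return total_movement
--
-- def apply_local_search(
--     progression: List[Tuple[str, str]],
--     initial_voicings: List[List[int]],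
--     max_iterations: int = 100
-- ) -> List[List[int]]:
--     """
--     Improve voicings using hill-climbing local search.
--
--     Iteratively tries small improvements until no better neighbor found.
--
--     Args:
--         progression: List of (root, quality) tuples
--         initial_voicings: Starting voicings
--         max_iterations: Max iterations
--
--     Returns:
--         Improved voicings
--
--     Example:
--         >>> initial = [[60, 64, 67, 71], [60, 65, 69, 72]]
--         >>> improved = apply_local_search([('C', 'maj7'), ('F', 'maj7')], initial)
--     """
--     current = initial_voicings
--     current_cost = _calculate_total_cost(current)
--
--     for _ in range(max_iterations):
--         # Generate neighbors (small modifications)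
--         neighbors = _generate_neighbors(current)
--
--         # Find best neighbor
--         best_neighbor = None
--         best_cost = current_cost
--
--         for neighbor in neighbors:
--             cost = _calculate_total_cost(neighbor)
--             if cost < best_cost:
--                 best_cost = cost
--                 best_neighbor = neighbor
--
--         if best_neighbor is None:
--             break  # Local optimum reached
--
--         current = best_neighbor
--         current_cost = best_cost
--
--     return current
--
-- def _generate_neighbors(voicings: List[List[int]]) -> List[List[List[int]]]:
--     """Generate neighboring solutions (small modifications)."""
--     neighbors = []
--
--     for i in range(len(voicings)):
--         # Try octave shifts for each note
--         for j in range(len(voicings[i])):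
--             # Shift note up octave
--             neighbor = [v.copy() for v in voicings]
--             neighbor[i][j] += 12
--             neighbors.append(neighbor)
--
--             # Shift note down octave
--             neighbor = [v.copy() for v in voicings]
--             neighbor[i][j] -= 12
--             neighbors.append(neighbor)
--
--     return neighbors
--
-- def _calculate_total_cost(voicings: List[List[int]]) -> float:
--     """Calculate total cost across all transitions."""
--     total = 0
--     for i in range(len(voicings) - 1):
--         total += _default_voice_movement_cost(voicings[i], voicings[i + 1])
--     return total
-- ===== SOURCE B (Python) =====
-- def apply_local_search(progression, initial_voicings, max_iterations=100):
--     """Hill-climbing with incremental cost update: each candidate move changes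
--     only the (at most two) transitions touching the modified chord, so we
--     evaluate its delta locally instead of recomputing the whole cost."""
--
--     def _transition_cost(voicing1, voicing2):
--         total = 0
--         for note1 in voicing1:
--             total += min(abs(note2 - note1) for note2 in voicing2)
--         return total
--
--     def _local_cost(voicings, i, row):
--         c = 0
--         if i > 0:
--             c += _transition_cost(voicings[i - 1], row)
--         if i + 1 < len(voicings):
--             c += _transition_cost(row, voicings[i + 1])
--         return c
--
--     current = [list(v) for v in initial_voicings]
--     for _ in range(max_iterations):
--         best_move = None
--         best_delta = 0
--         for i in range(len(current)):
--             base = _local_cost(current, i, current[i])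
--             for j in range(len(current[i])):
--                 for s in (12, -12):
--                     row = current[i].copy()
--                     row[j] += s
--                     delta = _local_cost(current, i, row) - base
--                     if delta < best_delta:
--                         best_move = (i, j, s)
--                         best_delta = delta
--         if best_move is None:
--             return current
--         i, j, s = best_move
--         current[i][j] += s
--     return current
-- ===== Notes on version B (the rewrite author's own statement) =====
-- stated objective: faster
-- what changed: Instead of materialising every neighbour and recomputing the full transition-cost sum for each, B scores each candidate single-note octave shift by the delta of the at most two transitions it touches, keeping A's exact enumeration order and strict-improvement tie-breaking.
import Mathlib
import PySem

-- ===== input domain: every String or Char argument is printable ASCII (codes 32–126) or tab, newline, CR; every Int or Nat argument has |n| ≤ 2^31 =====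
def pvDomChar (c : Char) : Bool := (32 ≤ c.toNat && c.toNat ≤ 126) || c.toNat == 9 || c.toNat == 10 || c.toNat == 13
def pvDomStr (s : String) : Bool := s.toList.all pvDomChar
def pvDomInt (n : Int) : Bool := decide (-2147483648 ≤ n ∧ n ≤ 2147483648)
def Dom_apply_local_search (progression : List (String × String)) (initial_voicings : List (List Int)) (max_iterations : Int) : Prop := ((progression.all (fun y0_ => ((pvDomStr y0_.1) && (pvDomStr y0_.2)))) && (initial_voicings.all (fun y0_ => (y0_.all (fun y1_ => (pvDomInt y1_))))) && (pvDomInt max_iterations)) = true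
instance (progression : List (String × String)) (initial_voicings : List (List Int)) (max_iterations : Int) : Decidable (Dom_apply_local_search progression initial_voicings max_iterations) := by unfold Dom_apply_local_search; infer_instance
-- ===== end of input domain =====

-- B replaces A's "build all neighbours, recompute the full cost of each" by delta scoring of each
-- single-note octave shift over the at most two transitions it touches (objective: faster).

-- ===== PORT A =====
-- _default_voice_movement_cost: min(...) of an empty sequence raises in Python; the .getD 0 arm is
-- unreachable under Pre_apply_local_search, which excludes exactly those inputs.
def mvA (v1 v2 : List Int) : Int :=
  v1.foldl (fun acc n1 => acc + ((v2.map (fun n2 => |n2 - n1|)).min?.getD 0)) 0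

-- _calculate_total_cost (for i in range(len(voicings)-1): …)
def totalCostA (vs : List (List Int)) : Int :=
  (List.range (vs.length - 1)).foldl (fun t i => t + mvA (vs.getD i []) (vs.getD (i + 1) [])) 0

-- neighbor = [v.copy() for v in voicings]; neighbor[i][j] += d
def copySetA (vs : List (List Int)) (i j : Nat) (d : Int) : List (List Int) :=
  vs.set i ((vs.getD i []).set j ((vs.getD i []).getD j 0 + d))

-- _generate_neighbors
def neighborsA (vs : List (List Int)) : List (List (List Int)) :=
  (List.range vs.length).foldl (fun acc i =>
    (List.range (vs.getD i []).length).foldl (fun acc2 j =>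
      (acc2 ++ [copySetA vs i j 12]) ++ [copySetA vs i j (-12)]) acc) []

-- the best-neighbor scan inside the main loop
def pickBestA (c : Int) (ns : List (List (List Int))) : Option (List (List Int)) × Int :=
  ns.foldl (fun st nb =>
    let cost := totalCostA nb
    if cost < st.2 then (some nb, cost) else st) ((none : Option (List (List Int))), c)

-- for _ in range(max_iterations): … break at local optimum
def searchA : Nat → List (List Int) → Int → List (List Int)
  | 0, cur, _ => cur
  | n + 1, cur, c =>
    let p := pickBestA c (neighborsA cur)
    match p.1 with
    | none => cur
    | some nb => searchA n nb p.2

def apply_local_search (progression : List (String × String)) (initial_voicings : List (List Int)) (max_iterations : Int) : List (List Int) :=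
  searchA max_iterations.toNat initial_voicings (totalCostA initial_voicings)

-- ===== PORT B =====
-- _transition_cost (same leaf computation as A's movement cost)
def mvB (v1 v2 : List Int) : Int :=
  v1.foldl (fun acc n1 => acc + ((v2.map (fun n2 => |n2 - n1|)).min?.getD 0)) 0

-- _local_cost: only the transitions into and out of chord i
def localB (vs : List (List Int)) (i : Nat) (row : List Int) : Int :=
  (if i = 0 then 0 else mvB (vs.getD (i - 1) []) row) +
  (if i + 1 < vs.length then mvB row (vs.getD (i + 1) []) else 0)

-- row = current[i].copy(); row[j] += s
def moveRowB (vs : List (List Int)) (i j : Nat) (s : Int) : List Int :=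
  (vs.getD i []).set j ((vs.getD i []).getD j 0 + s)

-- the triple loop choosing the best (i, j, s) by local delta
def pickBestMoveB (vs : List (List Int)) : Option (Nat × Nat × Int) × Int :=
  (List.range vs.length).foldl (fun st i =>
    let base := localB vs i (vs.getD i [])
    (List.range (vs.getD i []).length).foldl (fun st2 j =>
      ([(12 : Int), -12]).foldl (fun st3 s =>
        let delta := localB vs i (moveRowB vs i j s) - base
        if delta < st3.2 then (some (i, j, s), delta) else st3) st2) st) (none, 0)

-- current[i][j] += s
def applyMoveB (vs : List (List Int)) (i j : Nat) (s : Int) : List (List Int) :=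
  vs.set i (moveRowB vs i j s)

def searchB : Nat → List (List Int) → List (List Int)
  | 0, cur => cur
  | n + 1, cur =>
    let p := pickBestMoveB cur
    match p.1 with
    | none => cur
    | some (i, j, s) => searchB n (applyMoveB cur i j s)

def apply_local_search_alt (progression : List (String × String)) (initial_voicings : List (List Int)) (max_iterations : Int) : List (List Int) :=
  searchB max_iterations.toNat initial_voicings

-- ===== PRECONDITION & SPEC =====
-- Pre_ excludes exactly the inputs on which Python A raises ValueError: an adjacent pair of chords
-- whose first voicing is nonempty and second is empty makes min() see an empty sequence.
def Pre_apply_local_search (progression : List (String × String)) (initial_voicings : List (List Int)) (max_iterations : Int) : Prop :=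
  ∀ p ∈ initial_voicings.zip initial_voicings.tail, p.1 ≠ [] → p.2 ≠ []
instance (progression : List (String × String)) (initial_voicings : List (List Int)) (max_iterations : Int) : Decidable (Pre_apply_local_search progression initial_voicings max_iterations) := by unfold Pre_apply_local_search; infer_instance

def pvWitness_apply_local_search : (List (String × String)) × List (List Int) × Int :=
  ([("C", "maj7"), ("F", "maj7")], [[60, 64, 67, 71], [60, 65, 69, 72]], 5)

def Spec_apply_local_search (progression : List (String × String)) (initial_voicings : List (List Int)) (max_iterations : Int) (out : List (List Int)) : Prop := out = apply_local_search_alt progression initial_voicings max_iterations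
instance (progression : List (String × String)) (initial_voicings : List (List Int)) (max_iterations : Int) (out : List (List Int)) : Decidable (Spec_apply_local_search progression initial_voicings max_iterations out) := by unfold Spec_apply_local_search; infer_instance

-- ===== CLAIM (what is proved, stated in full; the proofs are below) =====
def Claim_equal_apply_local_search : Prop := ∀ (progression : List (String × String)) (initial_voicings : List (List Int)) (max_iterations : Int), Dom_apply_local_search progression initial_voicings max_iterations → Pre_apply_local_search progression initial_voicings max_iterations → Spec_apply_local_search progression initial_voicings max_iterations (apply_local_search progression initial_voicings max_iterations)

-- ===== LEMMAS AND PROOFS =====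

-- structural version of A's total cost
def costAdj : List (List Int) → Int
  | [] => 0
  | [_] => 0
  | x :: y :: t => mvA x y + costAdj (y :: t)

-- the list of candidate moves, in B's (and A's) enumeration order
def movesOf (vs : List (List Int)) : List (Nat × Nat × Int) :=
  (List.range vs.length).flatMap (fun i =>
    (List.range (vs.getD i []).length).flatMap (fun j => [(i, j, 12), (i, j, (-12 : Int))]))

-- A's best-neighbor step, as a named function
def stepAd (st : Option (List (List Int)) × Int) (nb : List (List Int)) : Option (List (List Int)) × Int :=
  let cost := totalCostA nb
  if cost < st.2 then (some nb, cost) else st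

def stepB (vs : List (List Int)) (st : Option (Nat × Nat × Int) × Int) (m : Nat × Nat × Int) : Option (Nat × Nat × Int) × Int :=
  let delta := localB vs m.1 (moveRowB vs m.1 m.2.1 m.2.2) - localB vs m.1 (vs.getD m.1 [])
  if delta < st.2 then (some m, delta) else st

lemma foldl_add_init (g : Nat → Int) : ∀ (l : List Nat) (c : Int),
    l.foldl (fun a i => a + g i) c = c + l.foldl (fun a i => a + g i) 0 := by
  intro l
  induction l with
  | nil => simp
  | cons x t ih => intro c; simp only [List.foldl_cons]; rw [ih, ih (0 + g x)]; ring_nf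

lemma totalCostA_eq_costAdj : ∀ vs, totalCostA vs = costAdj vs := by
  intro vs
  induction vs with
  | nil => rfl
  | cons x t ih =>
    cases t with
    | nil => rfl
    | cons y t' =>
      show totalCostA (x :: y :: t') = costAdj (x :: y :: t')
      rw [costAdj, ← ih]
      unfold totalCostA
      simp only [List.length_cons, Nat.add_sub_cancel, List.range_succ_eq_map,
        List.foldl_cons, List.foldl_map, List.getD_cons_succ, List.getD_cons_zero]
      rw [foldl_add_init (fun i => mvA ((y :: t').getD i []) (t'.getD i []))]
      ring


lemma mvB_eq : mvB = mvA := rfl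


lemma localB_cons_succ (x : List Int) (t : List (List Int)) (k' : Nat) (row : List Int) :
    localB (x :: t) (k' + 2) row = localB t (k' + 1) row := by
  unfold localB
  simp only [List.length_cons, List.getD_cons_succ, Nat.add_sub_cancel, Nat.succ_ne_zero,
    if_false]
  congr 1
  exact if_congr (by omega) rfl rfl


lemma localB_cons_one (x y : List Int) (t : List (List Int)) (row : List Int) :
    localB (x :: y :: t) 1 row = mvB x row + localB (y :: t) 0 row := by
  unfold localB
  simp only [List.length_cons, List.getD_cons_succ, List.getD_cons_zero, one_ne_zero, if_false,
    Nat.sub_self]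
  rw [if_congr (show 1 + 1 < t.length + 1 + 1 ↔ 0 + 1 < t.length + 1 by omega) rfl rfl]
  simp


lemma costAdj_set (r : List Int) : ∀ (vs : List (List Int)) (i : Nat), i < vs.length →
    costAdj (vs.set i r) = costAdj vs - localB vs i (vs.getD i []) + localB vs i r := by
  intro vs
  induction vs with
  | nil => intro i hi; simp at hi
  | cons x t ih =>
    intro i hi
    match i with
    | 0 =>
      cases t with
      | nil => simp [costAdj, localB]
      | cons y t' =>
        simp only [List.set_cons_zero, List.getD_cons_zero]
        rw [show costAdj (r :: y :: t') = mvA r y + costAdj (y :: t') from rfl,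
            show costAdj (x :: y :: t') = mvA x y + costAdj (y :: t') from rfl]
        simp only [localB, List.length_cons, List.getD_cons_succ, List.getD_cons_zero,
          mvB_eq, if_true]
        split_ifs with hcc
        · ring
        · omega
    | k + 1 =>
      cases t with
      | nil => simp at hi
      | cons y t' =>
        have hk : k < (y :: t').length := by simpa using hi
        have IH := ih k hk
        match k with
        | 0 =>
          simp only [List.set_cons_succ, List.set_cons_zero] at *
          rw [show costAdj (x :: r :: t') = mvA x r + costAdj (r :: t') from rfl,
              show costAdj (x :: y :: t') = mvA x y + costAdj (y :: t') from rfl]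
          rw [IH]
          rw [show (x :: y :: t').getD 1 [] = (y :: t').getD 0 [] from rfl]
          rw [localB_cons_one, localB_cons_one]
          rw [mvB_eq]
          simp only [List.getD_cons_zero]
          ring
        | k' + 1 =>
          simp only [List.set_cons_succ]
          rw [show costAdj (x :: y :: (t'.set k' r)) = mvA x y + costAdj ((y :: t').set (k' + 1) r) from rfl,
              show costAdj (x :: y :: t') = mvA x y + costAdj (y :: t') from rfl]
          rw [IH]
          rw [show (x :: y :: t').getD (k' + 1 + 1) [] = (y :: t').getD (k' + 1) [] from rfl]
          rw [localB_cons_succ, localB_cons_succ]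
          ring


lemma totalCostA_move (vs : List (List Int)) (i j : Nat) (s : Int) (hi : i < vs.length) :
    totalCostA (copySetA vs i j s) =
      totalCostA vs + (localB vs i (moveRowB vs i j s) - localB vs i (vs.getD i [])) := by
  have e : copySetA vs i j s = vs.set i (moveRowB vs i j s) := rfl
  rw [e, totalCostA_eq_costAdj, totalCostA_eq_costAdj, costAdj_set _ _ _ hi]
  ring

lemma foldl_acc_append {α β : Type} (h : α → List β) : ∀ (l : List α) (init : List β),
    l.foldl (fun acc a => acc ++ h a) init = init ++ l.flatMap h := by
  intro l
  induction l with
  | nil => simp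
  | cons x t ih => intro init; simp [List.flatMap_cons, ih]

lemma foldl_two_append {α β : Type} (u v : α → List β) : ∀ (l : List α) (init : List β),
    l.foldl (fun acc a => (acc ++ u a) ++ v a) init = init ++ l.flatMap (fun a => u a ++ v a) := by
  intro l
  induction l with
  | nil => simp
  | cons x t ih => intro init; simp [List.flatMap_def]

lemma foldl_flatMap' {α β γ : Type} (g : α → List β) (f : γ → β → γ) :
    ∀ (l : List α) (init : γ), (l.flatMap g).foldl f init = l.foldl (fun acc a => (g a).foldl f acc) init := by
  intro l
  induction l with
  | nil => simp
  | cons x t ih => intro init; simp [List.flatMap_cons, List.foldl_append, ih]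

lemma neighborsA_eq (vs : List (List Int)) :
    neighborsA vs = (movesOf vs).map (fun m => copySetA vs m.1 m.2.1 m.2.2) := by
  unfold neighborsA movesOf
  rw [List.foldl_ext _ (fun acc i => acc ++ (List.range (vs.getD i []).length).flatMap
        (fun j => [copySetA vs i j 12] ++ [copySetA vs i j (-12)])) []
      (fun acc i _ => foldl_two_append (fun j => [copySetA vs i j 12])
        (fun j => [copySetA vs i j (-12)]) (List.range (vs.getD i []).length) acc)]
  rw [foldl_acc_append]
  simp [List.map_flatMap]

lemma pickBestA_eq (c : Int) (ns : List (List (List Int))) :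
    pickBestA c ns = ns.foldl stepAd (none, c) := rfl

lemma pickBestMoveB_eq (vs : List (List Int)) :
    pickBestMoveB vs = (movesOf vs).foldl (stepB vs) (none, 0) := by
  unfold pickBestMoveB movesOf
  rw [foldl_flatMap']
  refine List.foldl_ext _ _ _ (fun st i _ => ?_)
  rw [foldl_flatMap']
  refine List.foldl_ext _ _ _ (fun st2 j _ => ?_)
  simp [stepB]

def SInv (vs : List (List Int)) (stA : Option (List (List Int)) × Int) (stB : Option (Nat × Nat × Int) × Int) : Prop :=
  stA.1 = stB.1.map (fun m => copySetA vs m.1 m.2.1 m.2.2) ∧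
  stA.2 = totalCostA vs + stB.2 ∧
  (∀ m, stB.1 = some m → stA.2 = totalCostA (copySetA vs m.1 m.2.1 m.2.2))

lemma corr (vs : List (List Int)) : ∀ (ms : List (Nat × Nat × Int)) (stA : Option (List (List Int)) × Int) (stB : Option (Nat × Nat × Int) × Int),
    (∀ m ∈ ms, m.1 < vs.length) → SInv vs stA stB →
    SInv vs ((ms.map (fun m => copySetA vs m.1 m.2.1 m.2.2)).foldl stepAd stA)
      (ms.foldl (stepB vs) stB) := by
  intro ms
  induction ms with
  | nil => intro stA stB _ h; simpa using h
  | cons m ms ih =>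
    intro stA stB hval hinv
    simp only [List.map_cons, List.foldl_cons]
    refine ih _ _ (fun m' hm' => hval m' (List.mem_cons_of_mem _ hm')) ?_
    obtain ⟨h1, h2, h3⟩ := hinv
    have hm : m.1 < vs.length := hval m (List.mem_cons_self ..)
    have hc := totalCostA_move vs m.1 m.2.1 m.2.2 hm
    show SInv vs (stepAd stA (copySetA vs m.1 m.2.1 m.2.2)) (stepB vs stB m)
    unfold stepAd stepB
    by_cases hlt : localB vs m.1 (moveRowB vs m.1 m.2.1 m.2.2) - localB vs m.1 (vs.getD m.1 []) < stB.2
    · rw [if_pos hlt, if_pos (by rw [hc, h2]; linarith)]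
      refine ⟨rfl, by rw [hc], fun m' hm' => ?_⟩
      obtain rfl : m = m' := by simpa using hm'
      rfl
    · rw [if_neg hlt, if_neg (by rw [hc, h2]; intro hcon; exact hlt (by linarith))]
      exact ⟨h1, h2, h3⟩

lemma movesOf_valid (vs : List (List Int)) : ∀ m ∈ movesOf vs, m.1 < vs.length := by
  intro m hm
  simp only [movesOf, List.mem_flatMap, List.mem_range, List.mem_cons, List.not_mem_nil, or_false] at hm
  obtain ⟨i, hi, j, hj, h⟩ := hm
  rcases h with rfl | rfl <;> exact hi

lemma search_eq : ∀ (n : Nat) (vs : List (List Int)), searchA n vs (totalCostA vs) = searchB n vs := by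
  intro n
  induction n with
  | zero => intro vs; rfl
  | succ n ih =>
    intro vs
    have hinv := corr vs (movesOf vs) (none, totalCostA vs) (none, 0) (movesOf_valid vs)
      ⟨rfl, by simp, by simp⟩
    have eA : pickBestA (totalCostA vs) (neighborsA vs)
        = ((movesOf vs).map (fun m => copySetA vs m.1 m.2.1 m.2.2)).foldl stepAd (none, totalCostA vs) := by
      rw [pickBestA_eq, neighborsA_eq]
    simp only [searchA, searchB]
    rw [eA, pickBestMoveB_eq]
    rcases ho : ((movesOf vs).foldl (stepB vs) (none, 0)).1 with _ | ⟨i, j, s⟩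
    · have hA : (((movesOf vs).map (fun m => copySetA vs m.1 m.2.1 m.2.2)).foldl stepAd (none, totalCostA vs)).1 = none := by
        rw [hinv.1, ho]; rfl
      rw [hA]
    · have hA : (((movesOf vs).map (fun m => copySetA vs m.1 m.2.1 m.2.2)).foldl stepAd (none, totalCostA vs)).1 = some (copySetA vs i j s) := by
        rw [hinv.1, ho]; rfl
      have h2 : (((movesOf vs).map (fun m => copySetA vs m.1 m.2.1 m.2.2)).foldl stepAd (none, totalCostA vs)).2 = totalCostA (copySetA vs i j s) :=
        hinv.2.2 _ ho
      rw [hA]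
      show searchA n (copySetA vs i j s) _ = searchB n (applyMoveB vs i j s)
      rw [h2]
      exact ih (copySetA vs i j s)

-- ===== VERDICT (by name: the statement is the Claim_ definition above) =====
theorem apply_local_search_spec : Claim_equal_apply_local_search := by
  intro progression initial_voicings max_iterations _ _
  unfold Spec_apply_local_search apply_local_search apply_local_search_alt
  exact search_eq _ _
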